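-- pv_equiv track=rewrite | github.com/crazycat256/uuidtool | src/uuidtool/utils.py | alt_sort
-- ===== SOURCE A (Python) =====
-- def alt_sort(timestamps: list[int]) -> list[int]:
--     """Sort a list of timestamps in an alternating pattern
--
--     Args:
--         timestamps (list[int]): The timestamps to sort
--
--     Returns:
--         list[int]: The sorted timestamps
--     """
--     out = []
--     size = len(timestamps)
--     if len(timestamps) // 2 != 0:
--         idx = size // 2
--         out.append(timestamps[idx])
--         i1, i2 = idx - 1, idx + 1
--     else:
--         idx = size // 2
--         i1, i2 = idx - 1, idx
--
--     while i1 >= 0: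
--         out.append(timestamps[i1])
--         if i2 < size:
--             out.append(timestamps[i2])
--         i1 -= 1
--         i2 += 1
--
--     return out
-- ===== SOURCE B (Python) =====
-- def alt_sort(timestamps: list[int]) -> list[int]:
--     """Sort a list of timestamps in an alternating pattern (center outward)."""
--     if not timestamps:
--         return []
--     mid = len(timestamps) // 2
--     left = timestamps[:mid][::-1]
--     right = timestamps[mid + 1:]
--     out = [timestamps[mid]]
--     for i, x in enumerate(left):
--         out.append(x)
--         if i < len(right):
--             out.append(right[i])
--     return out
-- ===== Notes on version B (the rewrite author's own statement) =====
-- stated objective: alternative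
-- what changed: Replaces A's outward two-pointer index walk (i1 decreasing, i2 increasing, with an in-loop bounds check) by slicing the list into a reversed left half and a right half once and then interleaving the two subsequences after the center element.
-- intended difference: On a single-element list A returns [] (its loop never runs and the lone element is dropped), while B returns that one element, which is the intended alternating ordering of a singleton. — e.g. on alt_sort([5]): A returns [], B returns [5]
import Mathlib
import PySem

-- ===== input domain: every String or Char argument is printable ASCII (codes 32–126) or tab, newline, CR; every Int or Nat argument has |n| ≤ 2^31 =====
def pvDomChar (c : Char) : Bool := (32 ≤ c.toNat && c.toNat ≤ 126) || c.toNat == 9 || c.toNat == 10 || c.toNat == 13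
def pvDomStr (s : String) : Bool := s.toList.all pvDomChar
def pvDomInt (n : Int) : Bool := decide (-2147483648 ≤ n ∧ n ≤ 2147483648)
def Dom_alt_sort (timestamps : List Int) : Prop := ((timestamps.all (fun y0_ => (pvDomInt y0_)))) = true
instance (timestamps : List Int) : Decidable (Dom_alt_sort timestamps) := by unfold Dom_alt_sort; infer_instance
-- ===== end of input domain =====

-- B replaces A's outward two-pointer index walk by slicing into a reversed left half and a
-- right half and interleaving them after the center element; B returns the lone element on a
-- singleton where A drops it (see D_alt_sort). Equivalence is about the return value only.

-- ===== PORT A =====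
-- the while loop: i1 walks down, i2 walks up; indices are in range whenever used, so pyGetD's
-- default 0 is never consulted
def alt_sortLoop (timestamps : List Int) (size : Int) (i1 i2 : Int) (out : List Int) : List Int :=
  if _h : i1 ≥ 0 then
    let out1 := out ++ [PySem.List.pyGetD timestamps i1 0]
    let out2 := if i2 < size then out1 ++ [PySem.List.pyGetD timestamps i2 0] else out1
    alt_sortLoop timestamps size (i1 - 1) (i2 + 1) out2
  else out
termination_by (i1 + 1).toNat
decreasing_by omega

def alt_sort (timestamps : List Int) : List Int :=
  let size : Int := timestamps.length
  if PySem.Int.floordiv size 2 ≠ 0 then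
    let idx := PySem.Int.floordiv size 2
    alt_sortLoop timestamps size (idx - 1) (idx + 1) [PySem.List.pyGetD timestamps idx 0]
  else
    let idx := PySem.Int.floordiv size 2
    alt_sortLoop timestamps size (idx - 1) idx []

-- ===== PORT B =====
-- the for-loop over `left`, consuming `right` alongside (len right ≤ len left always holds)
def alt_sortInterleave : List Int → List Int → List Int
  | [], _ => []
  | x :: xs, [] => x :: alt_sortInterleave xs []
  | x :: xs, y :: ys => x :: y :: alt_sortInterleave xs ys

def alt_sort_alt (timestamps : List Int) : List Int :=
  if timestamps = [] then []
  else
    let mid : Nat := timestamps.length / 2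
    let left := (PySem.List.slice timestamps none (some (mid : Int))).reverse
    let right := PySem.List.slice timestamps (some ((mid : Int) + 1)) none
    PySem.List.pyGetD timestamps (mid : Int) 0 :: alt_sortInterleave left right

-- ===== PRECONDITION & SPEC =====
-- On single-element lists A returns [] (its loop never runs, dropping the lone element);
-- B returns that element, the intended alternating ordering of a singleton.
def D_alt_sort (timestamps : List Int) : Prop := timestamps.length = 1
instance (timestamps : List Int) : Decidable (D_alt_sort timestamps) := by unfold D_alt_sort; infer_instance
def Spec_alt_sort (timestamps : List Int) (out : List Int) : Prop := ¬ D_alt_sort timestamps → out = alt_sort_alt timestamps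
instance (timestamps : List Int) (out : List Int) : Decidable (Spec_alt_sort timestamps out) := by unfold Spec_alt_sort; infer_instance
def pvDiffWitness_alt_sort : List Int := [5]
def pvDiffWitnessOut_alt_sort : (List Int) × (List Int) := ([], [5])

-- ===== CLAIM (what is proved, stated in full; the proofs are below) =====
def Claim_unchanged_alt_sort : Prop := ∀ (timestamps : List Int), Dom_alt_sort timestamps → Spec_alt_sort timestamps (alt_sort timestamps)
def Claim_changed_alt_sort : Prop := Dom_alt_sort (pvDiffWitness_alt_sort) ∧ D_alt_sort (pvDiffWitness_alt_sort) ∧ alt_sort (pvDiffWitness_alt_sort) = pvDiffWitnessOut_alt_sort.1 ∧ alt_sort_alt (pvDiffWitness_alt_sort) = pvDiffWitnessOut_alt_sort.2 ∧ pvDiffWitnessOut_alt_sort.1 ≠ pvDiffWitnessOut_alt_sort.2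
def Claim_exact_alt_sort : Prop := ∀ (timestamps : List Int), Dom_alt_sort timestamps → D_alt_sort timestamps → alt_sort timestamps ≠ alt_sort_alt timestamps

-- ===== LEMMAS AND PROOFS =====

-- the loop, characterised: with k elements left of the cursor and i2 on the right,
-- it appends the interleaving of the reversed left part and the tail from i2
theorem alt_sortLoop_eq (ts : List Int) (k : Nat) (i2 : Int) (out : List Int)
    (hk : k ≤ ts.length) (hi2 : 0 ≤ i2)
    (hdom : ts.length - i2.toNat ≤ k) :
    alt_sortLoop ts ts.length ((k : Int) - 1) i2 out
      = out ++ alt_sortInterleave ((ts.take k).reverse) (ts.drop i2.toNat) := by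
  induction k generalizing i2 out with
  | zero =>
      rw [alt_sortLoop]
      have hd : ts.drop i2.toNat = [] := List.drop_eq_nil_of_le (by omega)
      simp [hd, alt_sortInterleave]
  | succ k ih =>
      rw [alt_sortLoop, dif_pos (show ((k + 1 : Nat) : Int) - 1 ≥ 0 by push_cast; omega)]
      have hk' : k < ts.length := by omega
      have h1 : ((k + 1 : Nat) : Int) - 1 - 1 = (k : Int) - 1 := by push_cast; ring
      have htn : (((k + 1 : Nat) : Int) - 1).toNat = k := by omega
      have hget : PySem.List.pyGetD ts (((k + 1 : Nat) : Int) - 1) 0 = ts[k] := by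
        rw [PySem.List.pyGetD_eq_getElem ts (i := ((k + 1 : Nat) : Int) - 1) 0
          (by push_cast; omega) (by push_cast; omega)]
        simp only [htn]
      have htake : (ts.take (k + 1)).reverse = ts[k] :: (ts.take k).reverse := by
        rw [List.take_add_one]
        simp [List.getElem?_eq_getElem hk']
      by_cases hcmp : i2 < (ts.length : Int)
      · have hi2' : i2.toNat < ts.length := by omega
        have hdrop : ts.drop i2.toNat = ts[i2.toNat] :: ts.drop (i2.toNat + 1) := by
          exact (List.getElem_cons_drop hi2').symm
        have hget2 : PySem.List.pyGetD ts i2 0 = ts[i2.toNat] :=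
          PySem.List.pyGetD_eq_getElem ts 0 hi2 hcmp
        have hrec := ih (i2 + 1) (out ++ [ts[k]] ++ [ts[i2.toNat]]) (by omega) (by omega)
          (by omega)
        have ht : (i2 + 1).toNat = i2.toNat + 1 := by omega
        rw [ht] at hrec
        simp only [hget, hget2, h1, if_pos hcmp]
        rw [hrec, hdrop, htake]
        simp [alt_sortInterleave]
      · have hdrop : ts.drop i2.toNat = [] := List.drop_eq_nil_of_le (by omega)
        have hdrop' : ts.drop (i2 + 1).toNat = [] := List.drop_eq_nil_of_le (by omega)
        have hrec := ih (i2 + 1) (out ++ [ts[k]]) (by omega) (by omega) (by omega)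
        simp only [hget, h1, if_neg hcmp]
        rw [hrec, hdrop, hdrop', htake]
        simp [alt_sortInterleave]

theorem alt_sort_eq_alt (ts : List Int) (h : ts.length ≠ 1) : alt_sort ts = alt_sort_alt ts := by
  rcases Nat.eq_zero_or_pos ts.length with h0 | hpos
  · -- empty list
    have : ts = [] := List.eq_nil_of_length_eq_zero h0
    subst this
    simp [alt_sort, alt_sortLoop, alt_sort_alt, PySem.Int.floordiv]
  · -- length ≥ 2
    have h2 : 2 ≤ ts.length := by omega
    have hne : ts ≠ [] := by intro h'; subst h'; simp at hpos
    set n := ts.length with hn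
    have hfd : PySem.Int.floordiv (n : Int) 2 = ((n / 2 : Nat) : Int) := by
      exact_mod_cast PySem.Int.floordiv_natCast n 2
    have hmidlt : n / 2 < n := by omega
    simp only [alt_sort, alt_sort_alt]
    rw [← hn, hfd, if_pos (by push_cast; omega : ((n / 2 : Nat) : Int) ≠ 0), if_neg hne]
    have hloop := alt_sortLoop_eq ts (n / 2) (((n / 2 : Nat) : Int) + 1)
        [PySem.List.pyGetD ts ((n / 2 : Nat) : Int) 0]
        (by omega) (by omega) (by omega)
    have ht : (((n / 2 : Nat) : Int) + 1).toNat = n / 2 + 1 := by omega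
    rw [ht, ← hn] at hloop
    rw [hloop,
        show ((n / 2 : Nat) : Int) + 1 = ((n / 2 + 1 : Nat) : Int) from by push_cast; ring,
        PySem.List.slice_to_natCast, PySem.List.slice_from_natCast]
    rfl

-- ===== VERDICT (by name: the statement is the Claim_ definition above) =====
theorem alt_sort_spec : Claim_unchanged_alt_sort := by
  intro ts _ hD
  exact alt_sort_eq_alt ts hD

theorem alt_sort_changed : Claim_changed_alt_sort := by
  unfold Claim_changed_alt_sort
  refine ⟨by decide, by decide, ?_, ?_, by decide⟩
  · simp [pvDiffWitness_alt_sort, pvDiffWitnessOut_alt_sort, alt_sort, alt_sortLoop,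
      PySem.Int.floordiv]
  · decide

theorem alt_sort_tight : Claim_exact_alt_sort := by
  intro ts _ hD
  unfold D_alt_sort at hD
  match ts, hD with
  | [t], _ =>
    simp [alt_sort, alt_sortLoop, alt_sort_alt, PySem.Int.floordiv]
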